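-- pv_equiv track=rewrite | github.com/CodingTestStudy2/Daily_Morning_Coding_Test | 프로그래머스/lv2/오하늘/디펜스게임.py | solution
-- ===== SOURCE A (Python) =====
-- import heapq
--
-- def solution(n, k, enemy):
--     round = len(enemy)
--     if k>= round: # 무적권이 충분한 경우
--         return round
--     q = []
--
--     for i in range(round):
--         heapq.heappush(q, enemy[i])
--         if len(q) > k: # 무적권이 없음
--             last = heapq.heappop(q)
--             if last>n: # 병사가 부족하면
--                 return i
--             n-=last
--
--     return round
-- ===== SOURCE B (Python) =====
-- def solution(n, k, enemy):
--     total = len(enemy)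
--     kk = max(k, 0)
--     for r in range(kk + 1, total + 1):
--         pre = sorted(enemy[:r])
--         if sum(pre[:r - kk]) > n:
--             return r - 1
--     return total
-- ===== Notes on version B (the rewrite author's own statement) =====
-- stated objective: alternative
-- what changed: Replaced A's incremental min-heap plus mutable remaining-budget loop with a per-round closed-form cost: for each round r past the invincibility count, B sorts the first r enemies and tests whether the sum of the r-k smallest exceeds the original n, returning the round before the first failure.
import Mathlib
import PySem

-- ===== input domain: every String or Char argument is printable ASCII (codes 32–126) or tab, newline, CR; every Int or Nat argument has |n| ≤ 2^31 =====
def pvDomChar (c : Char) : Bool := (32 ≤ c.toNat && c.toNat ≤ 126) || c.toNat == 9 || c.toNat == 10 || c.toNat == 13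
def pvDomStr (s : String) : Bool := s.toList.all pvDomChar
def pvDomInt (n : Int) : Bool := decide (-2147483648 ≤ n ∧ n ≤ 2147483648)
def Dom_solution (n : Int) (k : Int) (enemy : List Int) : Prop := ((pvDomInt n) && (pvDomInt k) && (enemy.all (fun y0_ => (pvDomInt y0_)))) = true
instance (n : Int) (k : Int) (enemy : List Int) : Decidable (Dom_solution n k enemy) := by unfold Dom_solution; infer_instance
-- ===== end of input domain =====

-- B replaces A's incremental heap-and-mutable-budget loop with a per-round closed-form
-- prefix cost (sum of the r-k smallest of the first r enemies), same return value (alternative).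

-- ===== PORT A =====
-- heapq modeled as a min-first sorted list: heappush = ordered insert, heappop = (head, tail).
-- Exact for everything A observes about the heap: heappop returns the minimum element (Ints).
def pyHeapPush (q : List Int) (x : Int) : List Int :=
  match q with
  | [] => [x]
  | b :: t => if x ≤ b then x :: b :: t else b :: pyHeapPush t x

-- A's for-loop over range(round) with early return; state (n, i, q); 'last' = heappop result
-- (headI is safe: the list was just pushed to, so it is nonempty).
def solLoop (k : Int) (enemy : List Int) (n : Int) (i : Nat) (q : List Int) : Int :=
  if h : i < enemy.length then
    if ((pyHeapPush q enemy[i]).length : Int) > k then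
      if (pyHeapPush q enemy[i]).headI > n then (i : Int)
      else solLoop k enemy (n - (pyHeapPush q enemy[i]).headI) (i + 1) (pyHeapPush q enemy[i]).tail
    else solLoop k enemy n (i + 1) (pyHeapPush q enemy[i])
  else (enemy.length : Int)
  termination_by enemy.length - i

def solution (n : Int) (k : Int) (enemy : List Int) : Int :=
  if k ≥ (enemy.length : Int) then (enemy.length : Int)
  else solLoop k enemy n 0 []

-- ===== PORT B =====
-- B's for-loop over range(kk+1, total+1) with early return; enemy[:r] with 0 ≤ r is List.take r,
-- pre[:r-kk] with r ≥ kk+1 is List.take (r-kk) (Nat and Python subtraction agree there).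
def altLoop (n : Int) (kk : Nat) (enemy : List Int) (r : Nat) : Int :=
  if r ≤ enemy.length then
    if ((PySem.List.sorted (enemy.take r) (fun x => x) false).take (r - kk)).sum > n then
      (r : Int) - 1
    else altLoop n kk enemy (r + 1)
  else (enemy.length : Int)
  termination_by enemy.length + 1 - r

def solution_alt (n : Int) (k : Int) (enemy : List Int) : Int :=
  altLoop n (max k 0).toNat enemy ((max k 0).toNat + 1)

-- ===== PRECONDITION & SPEC =====
def Spec_solution (n : Int) (k : Int) (enemy : List Int) (out : Int) : Prop := out = solution_alt n k enemy
instance (n : Int) (k : Int) (enemy : List Int) (out : Int) : Decidable (Spec_solution n k enemy out) := by unfold Spec_solution; infer_instance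

-- ===== CLAIM (what is proved, stated in full; the proofs are below) =====
def Claim_equal_solution : Prop := ∀ (n : Int) (k : Int) (enemy : List Int), Dom_solution n k enemy → Spec_solution n k enemy (solution n k enemy)

-- ===== LEMMAS AND PROOFS =====

theorem push_perm (q : List Int) (x : Int) : (pyHeapPush q x).Perm (x :: q) := by
  induction q with
  | nil => simp [pyHeapPush]
  | cons b t ih =>
    simp only [pyHeapPush]
    split
    · exact List.Perm.refl _
    · exact (List.Perm.cons b ih).trans (List.Perm.swap x b t)

theorem push_pairwise (q : List Int) (x : Int) (h : q.Pairwise (· ≤ ·)) :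
    (pyHeapPush q x).Pairwise (· ≤ ·) := by
  induction q with
  | nil => simp [pyHeapPush]
  | cons b t ih =>
    simp only [pyHeapPush]
    rcases List.pairwise_cons.mp h with ⟨hb, ht⟩
    split
    · rename_i hxb
      exact List.pairwise_cons.mpr ⟨by
        intro y hy
        rcases List.mem_cons.mp hy with rfl | hyt
        · exact hxb
        · exact le_trans hxb (hb y hyt), h⟩
    · rename_i hxb
      refine List.pairwise_cons.mpr ⟨?_, ih ht⟩
      intro y hy
      rcases List.mem_cons.mp ((push_perm t x).mem_iff.mp hy) with rfl | hyt
      · omega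
      · exact hb y hyt

theorem push_length (q : List Int) (x : Int) : (pyHeapPush q x).length = q.length + 1 :=
  (push_perm q x).length_eq

theorem push_of_le (q : List Int) (x : Int) (hx : ∀ y ∈ q, x ≤ y) :
    pyHeapPush q x = x :: q := by
  cases q with
  | nil => simp [pyHeapPush]
  | cons b t => simp [pyHeapPush, hx b (List.mem_cons_self ..)]

-- x ≤ every element of q.drop m when q is sorted below a head ≥ x
theorem le_of_mem_drop (q : List Int) (a x : Int) (m : Nat) (hp : (a :: q).Pairwise (· ≤ ·))
    (hxa : x ≤ a) : ∀ y ∈ q.drop m, x ≤ y := by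
  intro y hy
  exact le_trans hxa ((List.pairwise_cons.mp hp).1 y (List.mem_of_mem_drop hy))

theorem push_drop_tail (m : Nat) (s : List Int) (x : Int) (hs : s.Pairwise (· ≤ ·)) :
    (pyHeapPush (s.drop m) x).tail = (pyHeapPush s x).drop (m + 1) := by
  induction m generalizing s with
  | zero => simp [List.drop_one]
  | succ m ih =>
    cases s with
    | nil => simp [pyHeapPush]
    | cons a t =>
      simp only [List.drop_succ_cons, pyHeapPush]
      split
      · rename_i hxa
        rw [push_of_le _ _ (le_of_mem_drop t a x m hs hxa)]
        simp
      · rw [List.drop_succ_cons, ih t (List.pairwise_cons.mp hs).2]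

theorem push_take_sum (m : Nat) (s : List Int) (x : Int) (hs : s.Pairwise (· ≤ ·)) :
    ((pyHeapPush s x).take (m + 1)).sum = (s.take m).sum + (pyHeapPush (s.drop m) x).headI := by
  induction m generalizing s with
  | zero =>
    cases s with
    | nil => simp [pyHeapPush]
    | cons a t =>
      simp only [pyHeapPush, List.drop_zero, List.take_zero, List.sum_nil]
      split <;> simp
  | succ m ih =>
    cases s with
    | nil => simp [pyHeapPush]
    | cons a t =>
      simp only [pyHeapPush, List.drop_succ_cons, List.take_succ_cons, List.sum_cons]
      split
      · rename_i hxa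
        rw [push_of_le _ _ (le_of_mem_drop t a x m hs hxa)]
        simp only [List.take_succ_cons, List.sum_cons, List.headI]
        ring
      · rw [List.take_succ_cons, List.sum_cons, ih t (List.pairwise_cons.mp hs).2]
        ring

-- abbreviation used only in proofs: the sorted prefix of length r
def S (enemy : List Int) (r : Nat) : List Int := PySem.List.sorted (enemy.take r) (fun x => x) false

theorem S_pairwise (enemy : List Int) (r : Nat) : (S enemy r).Pairwise (· ≤ ·) :=
  PySem.List.sorted_pairwise (enemy.take r) (fun x => x)

theorem S_length (enemy : List Int) (r : Nat) (h : r ≤ enemy.length) : (S enemy r).length = r := by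
  rw [S, PySem.List.length_sorted, List.length_take]; omega

theorem S_succ (enemy : List Int) (r : Nat) (h : r < enemy.length) :
    S enemy (r + 1) = pyHeapPush (S enemy r) enemy[r] := by
  have h3 : enemy.take (r + 1) = enemy.take r ++ [enemy[r]] := by
    rw [List.take_add_one, List.getElem?_eq_getElem h]; rfl
  refine PySem.List.sorted_id_eq_of_perm_of_pairwise _ _ ?_ (push_pairwise _ _ (S_pairwise enemy r))
  rw [h3]
  exact (push_perm _ _).trans
    (((PySem.List.sorted_perm _ _ _).cons _).trans (List.perm_append_singleton _ _).symm)

-- Phase 2: from round r ≥ kk on, A's heap is the kk largest of the sorted prefix and A's spent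
-- budget is B's closed-form cost of round r; both sides stop at the same round.
theorem loop_eq (k : Int) (enemy : List Int) (n0 : Int) (kk r : Nat)
    (hkk : (kk : Int) = max k 0) (hr : kk ≤ r) (hlen : r ≤ enemy.length) :
    solLoop k enemy (n0 - ((S enemy r).take (r - kk)).sum) r ((S enemy r).drop (r - kk))
      = altLoop n0 kk enemy (r + 1) := by
  rcases Nat.lt_or_ge r enemy.length with hlt | hge
  · have hsp := S_pairwise enemy r
    have hlen' : (S enemy r).length = r := S_length enemy r hlen
    have hql : ((S enemy r).drop (r - kk)).length = kk := by
      rw [List.length_drop, hlen']; omega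
    have hpl : ((pyHeapPush ((S enemy r).drop (r - kk)) enemy[r]).length : Int) > k := by
      rw [push_length, hql]; omega
    have hcost : ((S enemy (r + 1)).take (r + 1 - kk)).sum
        = ((S enemy r).take (r - kk)).sum
          + (pyHeapPush ((S enemy r).drop (r - kk)) enemy[r]).headI := by
      have he : r + 1 - kk = (r - kk) + 1 := by omega
      rw [he, S_succ enemy r hlt, push_take_sum (r - kk) _ _ hsp]
    have htail : (pyHeapPush ((S enemy r).drop (r - kk)) enemy[r]).tail
        = (S enemy (r + 1)).drop (r + 1 - kk) := by
      have he : r + 1 - kk = (r - kk) + 1 := by omega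
      rw [he, S_succ enemy r hlt, push_drop_tail (r - kk) _ _ hsp]
    conv_lhs => rw [solLoop]
    rw [dif_pos hlt, if_pos hpl]
    conv_rhs => rw [altLoop]
    rw [if_pos (show r + 1 ≤ enemy.length by omega)]
    have hSalt : PySem.List.sorted (enemy.take (r + 1)) (fun x => x) false = S enemy (r + 1) := rfl
    rw [hSalt]
    by_cases hfail :
        (pyHeapPush ((S enemy r).drop (r - kk)) enemy[r]).headI
          > n0 - ((S enemy r).take (r - kk)).sum
    · rw [if_pos hfail, if_pos (by omega)]
      push_cast; ring
    · rw [if_neg hfail, if_neg (by omega), htail]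
      have hn : n0 - ((S enemy r).take (r - kk)).sum
            - (pyHeapPush ((S enemy r).drop (r - kk)) enemy[r]).headI
          = n0 - ((S enemy (r + 1)).take (r + 1 - kk)).sum := by omega
      rw [hn]
      exact loop_eq k enemy n0 kk (r + 1) hkk (by omega) (by omega)
  · rw [solLoop, dif_neg (by omega), altLoop, if_neg (by omega)]
  termination_by enemy.length + 1 - r

-- Phase 1: the first kk rounds just fill the heap (no pop, no budget change).
theorem loop_fill (k : Int) (enemy : List Int) (n0 : Int) (kk r : Nat)
    (hkk : (kk : Int) = max k 0) (hr : r ≤ kk) (hlen : kk ≤ enemy.length) :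
    solLoop k enemy n0 r (S enemy r) = solLoop k enemy n0 kk (S enemy kk) := by
  rcases Nat.lt_or_ge r kk with hlt | hge
  · have hrl : r < enemy.length := by omega
    have hlen' : (S enemy r).length = r := S_length enemy r (by omega)
    rw [solLoop, dif_pos hrl,
      if_neg (show ¬ (((pyHeapPush (S enemy r) enemy[r]).length : Int) > k) by
        rw [push_length, hlen']; omega),
      ← S_succ enemy r hrl]
    exact loop_fill k enemy n0 kk (r + 1) hkk (by omega) hlen
  · have : r = kk := by omega
    rw [this]
  termination_by kk - r

-- ===== VERDICT (by name: the statement is the Claim_ definition above) =====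
theorem solution_spec : Claim_equal_solution := by
  intro n k enemy _
  show solution n k enemy = solution_alt n k enemy
  rw [solution, solution_alt]
  have hkk : (((max k 0).toNat : Nat) : Int) = max k 0 := by omega
  by_cases hbig : k ≥ (enemy.length : Int)
  · rw [if_pos hbig, altLoop, if_neg (by omega)]
  · rw [if_neg hbig]
    have hlen : (max k 0).toNat ≤ enemy.length := by omega
    have h0 : ([] : List Int) = S enemy 0 := by
      rw [S, List.take_zero]
      exact (PySem.List.sorted_eq_nil_iff _ _ _).mpr rfl |>.symm
    rw [h0, loop_fill k enemy n (max k 0).toNat 0 hkk (by omega) hlen]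
    have := loop_eq k enemy n (max k 0).toNat (max k 0).toNat hkk (le_refl _) hlen
    simpa using this
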